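-- pv_equiv track=rewrite | github.com/maciejGolebio/advent-of-code-2024 | day14/part1and2/main.py | has_x_lines_with_y_points_in_row
-- ===== SOURCE A (Python) =====
-- def has_x_lines_with_y_points_in_row(room, x, y):
--     count = 0
--     for i in range(len(room)):
--         row_count = 0
--         for j in range(len(room[i])):
--             if room[i][j] != 0:
--                 row_count += 1
--                 if row_count == y:
--                     count += 1
--                     break
--             else:
--                 row_count = 0
--
--         if count == x:
--             return True
-- ===== SOURCE B (Python) =====
-- def has_x_lines_with_y_points_in_row(room, x, y):
--     count = 0
--     for row in room:
--         if y >= 1 and any(all(v != 0 for v in row[i:i + y])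
--                           for i in range(len(row) - y + 1)):
--             count += 1
--         if count == x:
--             return True
-- ===== Notes on version B (the rewrite author's own statement) =====
-- stated objective: alternative
-- what changed: The inner incremental counter-with-reset-and-break scan is replaced by an explicit sliding-window test: a row qualifies iff y >= 1 and some window row[i:i+y] is all nonzero; the outer per-row count and count==x check are unchanged.
import Mathlib
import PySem

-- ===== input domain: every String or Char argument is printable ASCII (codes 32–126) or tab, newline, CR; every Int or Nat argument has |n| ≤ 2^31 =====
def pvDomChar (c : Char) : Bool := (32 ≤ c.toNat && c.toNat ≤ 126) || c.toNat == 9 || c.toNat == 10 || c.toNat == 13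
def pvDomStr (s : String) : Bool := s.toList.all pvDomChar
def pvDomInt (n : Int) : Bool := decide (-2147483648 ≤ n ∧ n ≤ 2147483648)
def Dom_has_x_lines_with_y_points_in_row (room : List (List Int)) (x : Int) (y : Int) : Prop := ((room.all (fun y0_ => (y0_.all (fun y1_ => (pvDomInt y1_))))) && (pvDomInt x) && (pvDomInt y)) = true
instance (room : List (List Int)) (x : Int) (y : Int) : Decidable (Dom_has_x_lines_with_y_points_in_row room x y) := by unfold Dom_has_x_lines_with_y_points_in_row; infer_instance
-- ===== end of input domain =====

-- B replaces A's inner counter-with-reset-and-break scan by an explicit sliding-window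
-- test (any window of length y all nonzero); same outer per-row counting (alternative).

-- ===== PORT A =====
-- inner loop of A: row_count accumulator, break (= return true) when it reaches y
def pvA_inner (y : Int) : List Int → Int → Bool
  | [], _ => false
  | v :: vs, rc =>
    if v ≠ 0 then
      if rc + 1 = y then true else pvA_inner y vs (rc + 1)
    else pvA_inner y vs 0

-- outer loop of A over rows, with the running count and the early 'return True'
def pvA_outer (x y : Int) : List (List Int) → Int → Option Bool
  | [], _ => none
  | r :: rs, count =>
    let count' := if pvA_inner y r 0 then count + 1 else count
    if count' = x then some true else pvA_outer x y rs count'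

def has_x_lines_with_y_points_in_row (room : List (List Int)) (x : Int) (y : Int) : Option Bool :=
  pvA_outer x y room 0

-- ===== PORT B =====
-- B's row test: y >= 1 and any(all(v != 0 for v in row[i:i+y]) for i in range(len(row)-y+1))
def pvB_rowQual (row : List Int) (y : Int) : Bool :=
  decide (1 ≤ y) &&
  (PySem.List.pyRange 0 ((row.length : Int) - y + 1) 1).any
    (fun i => (PySem.List.slice row (some i) (some (i + y))).all (fun v => v != 0))

-- outer loop of B over rows (same per-row counting as B's Python)
def pvB_outer (x y : Int) : List (List Int) → Int → Option Bool
  | [], _ => none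
  | r :: rs, count =>
    let count' := if pvB_rowQual r y then count + 1 else count
    if count' = x then some true else pvB_outer x y rs count'

def has_x_lines_with_y_points_in_row_alt (room : List (List Int)) (x : Int) (y : Int) : Option Bool :=
  pvB_outer x y room 0

-- ===== PRECONDITION & SPEC =====
def Spec_has_x_lines_with_y_points_in_row (room : List (List Int)) (x : Int) (y : Int) (out : Option Bool) : Prop := out = has_x_lines_with_y_points_in_row_alt room x y
instance (room : List (List Int)) (x : Int) (y : Int) (out : Option Bool) : Decidable (Spec_has_x_lines_with_y_points_in_row room x y out) := by unfold Spec_has_x_lines_with_y_points_in_row; infer_instance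

-- ===== CLAIM (what is proved, stated in full; the proofs are below) =====
def Claim_equal_has_x_lines_with_y_points_in_row : Prop := ∀ (room : List (List Int)) (x : Int) (y : Int), Dom_has_x_lines_with_y_points_in_row room x y → Spec_has_x_lines_with_y_points_in_row room x y (has_x_lines_with_y_points_in_row room x y)

-- ===== LEMMAS AND PROOFS =====

-- nonzero prefix of length m (with enough elements)
def prefNZ (row : List Int) (m : Nat) : Prop :=
  m ≤ row.length ∧ ∀ v ∈ row.take m, v ≠ 0

-- some window of length n is all nonzero
def hasWin (row : List Int) (n : Nat) : Prop :=
  ∃ i, prefNZ (row.drop i) n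

-- a zero occurs, followed by a window of length n
def zeroThenWin (row : List Int) (n : Nat) : Prop :=
  ∃ i, row[i]? = some 0 ∧ hasWin (row.drop (i + 1)) n

theorem prefNZ_nil (m : Nat) (hm : 1 ≤ m) : ¬ prefNZ ([] : List Int) m := by
  intro ⟨h, _⟩; simp at h; omega

theorem prefNZ_cons (v : Int) (vs : List Int) (m : Nat) (hm : 1 ≤ m) :
    prefNZ (v :: vs) m ↔ v ≠ 0 ∧ prefNZ vs (m - 1) := by
  obtain ⟨m', rfl⟩ : ∃ m', m = m' + 1 := ⟨m - 1, by omega⟩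
  simp [prefNZ, List.take_succ_cons]
  constructor
  · rintro ⟨h1, h2, h3⟩; exact ⟨h2, by omega, h3⟩
  · rintro ⟨h2, h1, h3⟩; exact ⟨by omega, h2, h3⟩

theorem prefNZ_mono (row : List Int) (m m' : Nat) (h : m ≤ m') (hp : prefNZ row m') :
    prefNZ row m := by
  obtain ⟨h1, h2⟩ := hp
  refine ⟨le_trans h h1, fun v hv => h2 v ?_⟩
  have hT : row.take m = (row.take m').take m := by
    rw [List.take_take, min_eq_left h]
  rw [hT] at hv
  exact List.take_subset m (row.take m') hv

theorem hasWin_shift (v : Int) (vs : List Int) (n : Nat) :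
    hasWin (v :: vs) n ↔ prefNZ (v :: vs) n ∨ hasWin vs n := by
  constructor
  · rintro ⟨i, hi⟩
    cases i with
    | zero => exact Or.inl hi
    | succ j => exact Or.inr ⟨j, by simpa using hi⟩
  · rintro (h | ⟨i, hi⟩)
    · exact ⟨0, h⟩
    · exact ⟨i + 1, by simpa using hi⟩

theorem zeroThenWin_cons (v : Int) (vs : List Int) (n : Nat) :
    zeroThenWin (v :: vs) n ↔ (v = 0 ∧ hasWin vs n) ∨ zeroThenWin vs n := by
  constructor
  · rintro ⟨i, h1, h2⟩
    cases i with
    | zero => exact Or.inl ⟨by simpa using h1, by simpa using h2⟩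
    | succ j => exact Or.inr ⟨j, by simpa using h1, by simpa using h2⟩
  · rintro (⟨h1, h2⟩ | ⟨i, h1, h2⟩)
    · exact ⟨0, by simp [h1], by simpa using h2⟩
    · exact ⟨i + 1, by simpa using h1, by simpa using h2⟩

-- characterization: a window exists iff it is a prefix or comes after a zero
theorem hasWin_char (row : List Int) (n : Nat) (hn : 1 ≤ n) :
    hasWin row n ↔ prefNZ row n ∨ zeroThenWin row n := by
  induction row with
  | nil =>
    constructor
    · rintro ⟨i, hi⟩; exact absurd (by simpa using hi) (prefNZ_nil n hn)
    · rintro (h | ⟨i, h1, _⟩)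
      · exact absurd h (prefNZ_nil n hn)
      · simp at h1
  | cons v vs ih =>
    rw [hasWin_shift, zeroThenWin_cons, ih]
    by_cases hv : v = 0
    · subst hv
      tauto
    · have hmono : prefNZ vs n → prefNZ (v :: vs) n := fun h =>
        (prefNZ_cons v vs n hn).mpr ⟨hv, prefNZ_mono vs (n - 1) n (by omega) h⟩
      tauto

-- A's inner loop with accumulated count rc = y - m returns true iff
-- a nonzero prefix of length m remains, or a full window comes after some zero
theorem pvA_inner_char (n : Nat) (hn : 1 ≤ n) (row : List Int) :
    ∀ m : Nat, 1 ≤ m → m ≤ n →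
      (pvA_inner (n : Int) row ((n : Int) - (m : Int)) = true ↔
        prefNZ row m ∨ zeroThenWin row n) := by
  induction row with
  | nil =>
    intro m hm _
    simp [pvA_inner, zeroThenWin]
    exact prefNZ_nil m hm
  | cons v vs ih =>
    intro m hm hmn
    by_cases hv : v = 0
    · subst hv
      have hstep : pvA_inner (n : Int) ((0 : Int) :: vs) ((n : Int) - (m : Int)) =
          pvA_inner (n : Int) vs ((n : Int) - (n : Int)) := by
        simp [pvA_inner]
      rw [hstep, ih n hn le_rfl, zeroThenWin_cons]
      have hp : ¬ prefNZ ((0 : Int) :: vs) m := by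
        rw [prefNZ_cons 0 vs m hm]; simp
      have hw := hasWin_char vs n hn
      tauto
    · by_cases hm1 : m = 1
      · subst hm1
        have h1 : ((n : Int) - 1) + 1 = (n : Int) := by ring
        simp only [Nat.cast_one]
        rw [show pvA_inner (n : Int) (v :: vs) ((n : Int) - 1) = true from by
          simp [pvA_inner, hv, h1]]
        simp only [true_iff]
        exact Or.inl ((prefNZ_cons v vs 1 le_rfl).mpr ⟨hv, by simp [prefNZ]⟩)
      · have hne : ((n : Int) - (m : Int)) + 1 ≠ (n : Int) := by omega
        have harg : ((n : Int) - (m : Int)) + 1 = (n : Int) - ((m - 1 : Nat) : Int) := by omega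
        have hstep : pvA_inner (n : Int) (v :: vs) ((n : Int) - (m : Int)) =
            pvA_inner (n : Int) vs ((n : Int) - ((m - 1 : Nat) : Int)) := by
          rw [← harg]; simp [pvA_inner, hv, hne]
        rw [hstep, ih (m - 1) (by omega) (by omega), prefNZ_cons v vs m hm, zeroThenWin_cons]
        tauto

-- B's row test is exactly: 1 ≤ y and some window of length y.toNat all nonzero
theorem pvB_rowQual_char (row : List Int) (y : Int) :
    pvB_rowQual row y = true ↔ 1 ≤ y ∧ hasWin row y.toNat := by
  unfold pvB_rowQual
  simp only [Bool.and_eq_true, decide_eq_true_eq, List.any_eq_true,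
    PySem.List.mem_pyRange_one]
  constructor
  · rintro ⟨hy, i, ⟨hi0, hilt⟩, hall⟩
    refine ⟨hy, ⟨i.toNat, ?_, ?_⟩⟩
    · simp only [List.length_drop]
      omega
    · intro v hv
      rw [PySem.List.slice_toNat row hi0 (by omega)] at hall
      have htn : (i + y).toNat - i.toNat = y.toNat := by omega
      rw [htn] at hall
      simp only [List.all_eq_true, bne_iff_ne, ne_eq] at hall
      exact hall v hv
  · rintro ⟨hy, i, hlen, hall⟩
    have hlen' : y.toNat ≤ row.length - i := by simpa using hlen
    refine ⟨hy, (i : Int), ⟨by omega, by omega⟩, ?_⟩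
    rw [PySem.List.slice_toNat row (by omega) (by omega)]
    have htn : ((i : Int) + y).toNat - ((i : Int)).toNat = y.toNat := by omega
    rw [htn]
    simp only [Int.toNat_natCast, List.all_eq_true, bne_iff_ne, ne_eq]
    exact hall

theorem pvA_inner_nonpos (y : Int) (hy : y ≤ 0) (row : List Int) :
    ∀ rc : Int, 0 ≤ rc → pvA_inner y row rc = false := by
  induction row with
  | nil => intro rc _; simp [pvA_inner]
  | cons v vs ih =>
    intro rc hrc
    by_cases hv : v = 0
    · subst hv; simpa [pvA_inner] using ih 0 le_rfl
    · have hne : rc + 1 ≠ y := by omega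
      simpa [pvA_inner, hv, hne] using ih (rc + 1) (by omega)

-- the inner scans agree
theorem inner_eq (row : List Int) (y : Int) :
    pvA_inner y row 0 = pvB_rowQual row y := by
  by_cases hy : 1 ≤ y
  · have hn : 1 ≤ y.toNat := by omega
    have hcast : ((y.toNat : Int)) = y := by omega
    have hA := pvA_inner_char y.toNat hn row y.toNat hn le_rfl
    rw [hcast] at hA
    simp only [sub_self] at hA
    have hB := pvB_rowQual_char row y
    by_cases h : prefNZ row y.toNat ∨ zeroThenWin row y.toNat
    · rw [hA.mpr h, Eq.comm, hB]
      exact ⟨hy, (hasWin_char row y.toNat hn).mpr h⟩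
    · have h1 : pvA_inner y row 0 = false := by
        cases hA' : pvA_inner y row 0
        · rfl
        · exact absurd (hA.mp hA') h
      have h2 : pvB_rowQual row y = false := by
        cases hB' : pvB_rowQual row y
        · rfl
        · exact absurd ((hasWin_char row y.toNat hn).mp (hB.mp hB').2) h
      rw [h1, h2]
  · rw [pvA_inner_nonpos y (by omega) row 0 le_rfl]
    unfold pvB_rowQual
    simp [hy]

theorem outer_eq (x y : Int) (rs : List (List Int)) :
    ∀ c : Int, pvA_outer x y rs c = pvB_outer x y rs c := by
  induction rs with
  | nil => intro c; rfl
  | cons r rs ih =>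
    intro c
    simp only [pvA_outer, pvB_outer, inner_eq r y]
    split <;> simp [ih]

-- ===== VERDICT (by name: the statement is the Claim_ definition above) =====
theorem has_x_lines_with_y_points_in_row_spec : Claim_equal_has_x_lines_with_y_points_in_row := by
  intro room x y _
  unfold Spec_has_x_lines_with_y_points_in_row has_x_lines_with_y_points_in_row has_x_lines_with_y_points_in_row_alt
  exact outer_eq x y room 0
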